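-- pv_equiv track=rewrite | github.com/Mufaddal007/Python | random test/anagrams.py | stringAnagram
-- ===== SOURCE A (Python) =====
-- def stringAnagram(dictionary, query):
--     arr1=[]
--     arr2=[]
--     fin=[]
--     for x in dictionary:
--         i=list(x)
--         i.sort()
--
--         arr1.append(i)
--
--     for x in query:
--         i=list(x)
--         i.sort()
--
--         arr2.append(i)
--     for x in arr2:
--         c=arr1.count(x)
--         fin.append(str(c))
--     return fin
-- ===== SOURCE B (Python) =====
-- def stringAnagram(dictionary, query):
--     # sort-free: anagram signature = 128-slot character-frequency vector (counting instead of sorting)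
--     def sig(w):
--         v = [0] * 128
--         for c in w:
--             v[ord(c)] += 1
--         return tuple(v)
--     counts = {}
--     for w in dictionary:
--         k = sig(w)
--         counts[k] = counts.get(k, 0) + 1
--     return [str(counts.get(sig(q), 0)) for q in query]
-- ===== Notes on version B (the rewrite author's own statement) =====
-- stated objective: faster
-- what changed: A sorts the characters of every word and, per query, linearly scans the whole list of sorted dictionary words with list.count; B never sorts: it computes a 128-slot character-frequency vector as the anagram signature of each word, tallies dictionary signatures in a hash map once, and answers each query with one lookup.
import Mathlib
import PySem

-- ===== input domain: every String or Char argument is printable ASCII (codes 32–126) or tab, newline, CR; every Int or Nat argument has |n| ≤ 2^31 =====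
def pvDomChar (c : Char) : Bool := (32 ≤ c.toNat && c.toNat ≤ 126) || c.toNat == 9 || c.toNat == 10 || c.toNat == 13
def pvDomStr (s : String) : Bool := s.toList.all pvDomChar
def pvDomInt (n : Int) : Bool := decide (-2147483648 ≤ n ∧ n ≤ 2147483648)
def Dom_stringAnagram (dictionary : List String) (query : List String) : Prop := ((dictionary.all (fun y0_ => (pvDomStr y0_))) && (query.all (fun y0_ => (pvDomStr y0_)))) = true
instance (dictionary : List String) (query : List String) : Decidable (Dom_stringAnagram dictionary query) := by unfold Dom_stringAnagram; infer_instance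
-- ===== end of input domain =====

-- B is sort-free: it replaces A's character sorting plus per-query linear scan by a 128-slot
-- character-frequency vector as anagram signature, tallied once in a dictionary (objective: faster).

-- ===== PORT A =====
-- list(x); i.sort()  =  sorted characters of x (Python sorts a list of 1-char strings = chars)
def stringAnagram (dictionary : List String) (query : List String) : List String :=
  let arr1 := dictionary.foldl
    (fun arr1 x => arr1 ++ [PySem.List.sorted x.toList (fun c => c) false]) []
  let arr2 := query.foldl
    (fun arr2 x => arr2 ++ [PySem.List.sorted x.toList (fun c => c) false]) []
  arr2.foldl (fun fin x => fin ++ [PySem.Int.toStr (arr1.count x)]) []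

-- ===== PORT B =====
-- sig(w): v = [0]*128; for c in w: v[ord(c)] += 1; return tuple(v).
-- 'v[ord(c)] += 1' is hand-ported as getD/set at index ord(c): exact whenever ord(c) < 128,
-- which holds for every character admitted by Dom_stringAnagram; tuple(v) is the list itself.
def pvSigL (cs : List Char) : List Int :=
  cs.foldl (fun v c => v.set c.toNat (v.getD c.toNat 0 + 1)) (List.replicate 128 0)

def pvSig (w : String) : List Int := pvSigL w.toList

def stringAnagram_alt (dictionary : List String) (query : List String) : List String :=
  let counts := dictionary.foldl
    (fun d w => let k := pvSig w; d.insert k (d.getD k 0 + 1))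
    (PySem.Dict.empty : PySem.Dict (List Int) Int)
  query.map (fun q => PySem.Int.toStr (counts.getD (pvSig q) 0))

-- ===== PRECONDITION & SPEC =====
def Spec_stringAnagram (dictionary : List String) (query : List String) (out : List String) : Prop := out = stringAnagram_alt dictionary query
instance (dictionary : List String) (query : List String) (out : List String) : Decidable (Spec_stringAnagram dictionary query out) := by unfold Spec_stringAnagram; infer_instance

-- ===== CLAIM (what is proved, stated in full; the proofs are below) =====
def Claim_equal_stringAnagram : Prop := ∀ (dictionary : List String) (query : List String), Dom_stringAnagram dictionary query → Spec_stringAnagram dictionary query (stringAnagram dictionary query)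

-- ===== LEMMAS AND PROOFS =====

theorem pv_getD_set (v : List Int) (j i : Nat) (x : Int) (h : j < v.length) :
    (v.set j x).getD i 0 = if i = j then x else v.getD i 0 := by
  rcases Nat.lt_or_ge i v.length with hi | hi
  · rw [List.getD_eq_getElem _ _ (by simpa using hi), List.getElem_set]
    by_cases he : i = j
    · simp [he]
    · simp [he, Ne.symm he, List.getElem?_eq_getElem hi]
  · have hij : i ≠ j := by omega
    rw [List.getD_eq_default _ _ (by simpa using hi), List.getD_eq_default _ _ hi, if_neg hij]

theorem pv_fold_length (cs : List Char) (v : List Int) :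
    (cs.foldl (fun v c => v.set c.toNat (v.getD c.toNat 0 + 1)) v).length = v.length := by
  induction cs generalizing v with
  | nil => rfl
  | cons c cs ih => simpa [List.foldl_cons] using ih (v.set c.toNat (v.getD c.toNat 0 + 1))

theorem pv_fold_getD (cs : List Char) (v : List Int)
    (h : ∀ c ∈ cs, c.toNat < v.length) (i : Nat) :
    (cs.foldl (fun v c => v.set c.toNat (v.getD c.toNat 0 + 1)) v).getD i 0
      = v.getD i 0 + (cs.countP (fun c => c.toNat == i) : Nat) := by
  induction cs generalizing v with
  | nil => simp
  | cons c cs ih =>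
    have hc : c.toNat < v.length := h c (List.mem_cons_self)
    have h' : ∀ d ∈ cs, d.toNat < (v.set c.toNat (v.getD c.toNat 0 + 1)).length := by
      intro d hd; simpa using h d (List.mem_cons_of_mem _ hd)
    rw [List.foldl_cons, ih _ h', pv_getD_set v c.toNat i _ hc, List.countP_cons]
    by_cases he : i = c.toNat
    · simp [he]; ring
    · have hb : (c.toNat == i) = false := by
        simp only [beq_eq_false_iff_ne]; exact fun hcon => he hcon.symm
      simp [he, hb]

theorem pvSigL_getD (cs : List Char) (h : ∀ c ∈ cs, c.toNat < 128) (i : Nat) :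
    (pvSigL cs).getD i 0 = (cs.countP (fun c => c.toNat == i) : Nat) := by
  unfold pvSigL
  rw [pv_fold_getD cs _ (by simpa using h) i]
  rcases Nat.lt_or_ge i 128 with hi | hi
  · rw [List.getD_eq_getElem _ _ (by simpa using hi)]
    simp only [List.getElem_replicate, zero_add]
  · rw [List.getD_eq_default _ _ (by simpa using hi)]; simp

theorem pv_char_toNat_inj (c d : Char) (h : c.toNat = d.toNat) : c = d :=
  Char.ext (UInt32.toNat_inj.mp h)

theorem pvSigL_eq_iff_perm (cs1 cs2 : List Char)
    (h1 : ∀ c ∈ cs1, c.toNat < 128) (h2 : ∀ c ∈ cs2, c.toNat < 128) :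
    pvSigL cs1 = pvSigL cs2 ↔ cs1.Perm cs2 := by
  constructor
  · intro hsig
    rw [List.perm_iff_count]
    intro c
    by_cases hc : c.toNat < 128
    · have key : ∀ cs : List Char, cs.count c = cs.countP (fun x => x.toNat == c.toNat) := by
        intro cs
        simp only [List.count]
        apply List.countP_congr
        intro x _
        constructor
        · intro hx; simp_all [beq_iff_eq]
        · intro hx
          have : x = c := pv_char_toNat_inj x c (by simpa using hx)
          simp [this]
      have := congrArg (fun v => v.getD c.toNat 0) hsig
      simp only at this
      rw [pvSigL_getD cs1 h1, pvSigL_getD cs2 h2] at this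
      rw [key, key]
      exact_mod_cast this
    · rw [List.count_eq_zero_of_not_mem (fun hm => hc (h1 c hm)),
          List.count_eq_zero_of_not_mem (fun hm => hc (h2 c hm))]
  · intro hperm
    apply List.ext_getElem
    · unfold pvSigL; rw [pv_fold_length, pv_fold_length]
    · intro i hi1 hi2
      have hi : i < 128 := by
        have := hi1; unfold pvSigL at this; rw [pv_fold_length] at this; simpa using this
      have e1 : (pvSigL cs1)[i] = (pvSigL cs1).getD i 0 := (List.getD_eq_getElem _ _ hi1).symm
      have e2 : (pvSigL cs2)[i] = (pvSigL cs2).getD i 0 := (List.getD_eq_getElem _ _ hi2).symm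
      rw [e1, e2, pvSigL_getD cs1 h1, pvSigL_getD cs2 h2, hperm.countP_eq]

theorem pv_dom_char (c : Char) (h : pvDomChar c = true) : c.toNat < 128 := by
  unfold pvDomChar at h
  simp only [Bool.or_eq_true, Bool.and_eq_true, decide_eq_true_eq, beq_iff_eq] at h
  omega

-- the per-query value agrees: count among sorted dictionary words = count among signature vectors
theorem pv_count_eq (dictionary : List String) (q : String)
    (hd : ∀ w ∈ dictionary, ∀ c ∈ w.toList, c.toNat < 128)
    (hq : ∀ c ∈ q.toList, c.toNat < 128) :
    (dictionary.map (fun w => PySem.List.sorted w.toList (fun c => c) false)).count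
        (PySem.List.sorted q.toList (fun c => c) false)
      = (dictionary.map pvSig).count (pvSig q) := by
  simp only [List.count, List.countP_map]
  apply List.countP_congr
  intro w hw
  have hperm1 : (PySem.List.sorted w.toList (fun c => c) false
      = PySem.List.sorted q.toList (fun c => c) false) ↔ w.toList.Perm q.toList :=
    PySem.List.sorted_id_eq_sorted_id_iff_perm w.toList q.toList
  have hperm2 : (pvSig w = pvSig q) ↔ w.toList.Perm q.toList :=
    pvSigL_eq_iff_perm w.toList q.toList (hd w hw) hq
  simp only [Function.comp, beq_iff_eq]
  rw [hperm1, ← hperm2]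

-- ===== VERDICT (by name: the statement is the Claim_ definition above) =====
theorem stringAnagram_spec : Claim_equal_stringAnagram := by
  intro dictionary query hdom
  unfold Dom_stringAnagram at hdom
  have hdom' := Bool.and_eq_true_iff.mp hdom
  have hd : ∀ w ∈ dictionary, ∀ c ∈ w.toList, c.toNat < 128 := by
    intro w hw c hc
    exact pv_dom_char c (by
      have := List.all_eq_true.mp hdom'.1 w hw
      exact List.all_eq_true.mp (by simpa [pvDomStr] using this) c hc)
  have hq : ∀ q ∈ query, ∀ c ∈ q.toList, c.toNat < 128 := by
    intro q hqm c hc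
    exact pv_dom_char c (by
      have := List.all_eq_true.mp hdom'.2 q hqm
      exact List.all_eq_true.mp (by simpa [pvDomStr] using this) c hc)
  unfold Spec_stringAnagram stringAnagram stringAnagram_alt
  simp only [PySem.List.foldl_append_singleton_eq_map, List.nil_append]
  have hfold : dictionary.foldl
      (fun d w => let k := pvSig w; d.insert k (d.getD k 0 + 1))
      (PySem.Dict.empty : PySem.Dict (List Int) Int)
      = (dictionary.map pvSig).foldl
        (fun d x => d.insert x (d.getD x 0 + 1)) PySem.Dict.empty := by
    rw [List.foldl_map]
  rw [hfold, List.map_map]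
  apply List.map_congr_left
  intro q hqm
  simp only [Function.comp]
  rw [PySem.Dict.getD_foldl_insert_add_one, PySem.Dict.getD_empty,
      pv_count_eq dictionary q hd (hq q hqm)]
  simp
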